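-- pv_equiv track=rewrite | github.com/bassmanitram/yacba | code/config/factory.py | _filter_meta_args
-- ===== SOURCE A (Python) =====
-- def _filter_meta_args(argv, also_filter_config=False):
--     """
--     Filter out meta-arguments that aren't part of YacbaConfig.
--
--     Args:
--         argv: Command-line arguments list
--         also_filter_config: If True, also filter --config (for manual handling)
--
--     Returns:
--         Filtered arguments list
--     """
--     filtered = []
--     skip_next = False
--
--     for arg in argv:
--         if skip_next:
--             skip_next = False
--             continue
--
--         if arg in ["--profile", "--init-config"]:
--             skip_next = True  # Skip the value too
--             continue
--         elif arg == "--config" and also_filter_config: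
--             skip_next = True  # Skip the value too when manually handling
--             continue
--         elif arg in ["--list-profiles", "--show-config"]:
--             continue  # Skip flag
--         else:
--             filtered.append(arg)
--
--     return filtered
-- ===== SOURCE B (Python) =====
-- def _filter_meta_args(argv, also_filter_config=False):
--     """Two staged passes: first mark the index set of tokens to drop (flags and
--     their values), then rebuild the list by filtering on that index set."""
--     value_flags = {"--profile", "--init-config"} | ({"--config"} if also_filter_config else set())
--     bare_flags = {"--list-profiles", "--show-config"}
--     drop = set()
--     for i, arg in enumerate(argv):
--         if i in drop:
--             continue
--         if arg in value_flags:
--             drop.add(i)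
--             drop.add(i + 1)
--         elif arg in bare_flags:
--             drop.add(i)
--     return [arg for i, arg in enumerate(argv) if i not in drop]
-- ===== Notes on version B (the rewrite author's own statement) =====
-- stated objective: alternative
-- what changed: Replaces the single-pass filter with trailing skip_next state by a two-stage mark-then-filter: pass one computes the set of argument indices to drop (each flag and, for value flags, its value's index), pass two rebuilds the list by an index-set membership test.
import Mathlib
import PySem

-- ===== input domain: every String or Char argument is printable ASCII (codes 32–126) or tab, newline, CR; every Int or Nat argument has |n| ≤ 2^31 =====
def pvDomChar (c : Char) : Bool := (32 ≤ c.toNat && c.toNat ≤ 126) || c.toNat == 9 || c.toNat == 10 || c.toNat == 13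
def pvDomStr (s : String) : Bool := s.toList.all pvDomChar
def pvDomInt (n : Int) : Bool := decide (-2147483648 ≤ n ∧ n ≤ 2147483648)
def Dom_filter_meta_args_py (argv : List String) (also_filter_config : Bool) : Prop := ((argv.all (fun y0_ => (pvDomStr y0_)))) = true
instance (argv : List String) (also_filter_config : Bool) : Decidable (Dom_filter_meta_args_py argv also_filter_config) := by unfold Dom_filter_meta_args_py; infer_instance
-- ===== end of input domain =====

-- B replaces A's single pass with skip_next state by two staged passes: mark the index set to drop, then filter by it (alternative decomposition, same cost).
-- ===== PORT A =====
def filter_meta_args_py (argv : List String) (also_filter_config : Bool) : List String :=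
  (argv.foldl (fun (s : List String × Bool) arg =>
      if s.2 then (s.1, false)
      else if arg = "--profile" ∨ arg = "--init-config" then (s.1, true)
      else if arg = "--config" ∧ also_filter_config then (s.1, true)
      else if arg = "--list-profiles" ∨ arg = "--show-config" then (s.1, false)
      else (s.1 ++ [arg], false)) ([], false)).1

-- ===== PORT B =====
-- value_flags = {"--profile", "--init-config"} | ({"--config"} if also_filter_config else set())
def fmaValueFlags (cfg : Bool) : PySem.Set String :=
  PySem.Set.union (PySem.Set.ofList ["--profile", "--init-config"])
    (if cfg then ["--config"] else [])

def fmaBareFlags : PySem.Set String := PySem.Set.ofList ["--list-profiles", "--show-config"]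

-- pass 1 of Source B: the loop body over enumerate(argv), building the drop set
def fmaMarkStep (cfg : Bool) (drop : PySem.Set Int) (p : Int × String) : PySem.Set Int :=
  if PySem.Set.contains drop p.1 then drop
  else if PySem.Set.contains (fmaValueFlags cfg) p.2 then
    PySem.Set.add (PySem.Set.add drop p.1) (p.1 + 1)
  else if PySem.Set.contains fmaBareFlags p.2 then PySem.Set.add drop p.1
  else drop

def filter_meta_args_py_alt (argv : List String) (also_filter_config : Bool) : List String :=
  let drop : PySem.Set Int :=
    (PySem.List.enumerate argv 0).foldl (fmaMarkStep also_filter_config) PySem.Set.empty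
  ((PySem.List.enumerate argv 0).filter
    (fun p => !(PySem.Set.contains drop p.1))).map (fun p => p.2)

-- ===== PRECONDITION & SPEC =====
def Spec_filter_meta_args_py (argv : List String) (also_filter_config : Bool) (out : List String) : Prop := out = filter_meta_args_py_alt argv also_filter_config
instance (argv : List String) (also_filter_config : Bool) (out : List String) : Decidable (Spec_filter_meta_args_py argv also_filter_config out) := by unfold Spec_filter_meta_args_py; infer_instance

-- ===== CLAIM (what is proved, stated in full; the proofs are below) =====
def Claim_equal_filter_meta_args_py : Prop := ∀ (argv : List String) (also_filter_config : Bool), Dom_filter_meta_args_py argv also_filter_config → Spec_filter_meta_args_py argv also_filter_config (filter_meta_args_py argv also_filter_config)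

-- ===== LEMMAS AND PROOFS =====

-- the step function of A's foldl (definitionally equal to the inline lambda in the port)
def fmaStep (cfg : Bool) (s : List String × Bool) (arg : String) : List String × Bool :=
  if s.2 then (s.1, false)
  else if arg = "--profile" ∨ arg = "--init-config" then (s.1, true)
  else if arg = "--config" ∧ cfg then (s.1, true)
  else if arg = "--list-profiles" ∨ arg = "--show-config" then (s.1, false)
  else (s.1 ++ [arg], false)

lemma fma_port_eq (argv : List String) (cfg : Bool) :
    filter_meta_args_py argv cfg = (argv.foldl (fmaStep cfg) ([], false)).1 := rfl

-- common structural middle form used to relate the two ports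
def fmaRec (argv : List String) (cfg : Bool) : List String :=
  match argv with
  | [] => []
  | head :: rest =>
    if head = "--profile" ∨ head = "--init-config" ∨ (head = "--config" ∧ cfg) then
      fmaRec (rest.drop 1) cfg
    else if head = "--list-profiles" ∨ head = "--show-config" then
      fmaRec rest cfg
    else
      head :: fmaRec rest cfg
termination_by argv.length
decreasing_by all_goals (simp; try omega)

lemma step_skip (cfg : Bool) (acc : List String) (head : String)
    (h : head = "--profile" ∨ head = "--init-config" ∨ (head = "--config" ∧ cfg = true)) :
    fmaStep cfg (acc, false) head = (acc, true) := by
  rcases h with rfl | rfl | ⟨rfl, hc⟩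
  · simp [fmaStep]
  · simp [fmaStep]
  · simp [fmaStep, hc]

lemma step_resume (cfg : Bool) (acc : List String) (y : String) :
    fmaStep cfg (acc, true) y = (acc, false) := by simp [fmaStep]

lemma step_bare (cfg : Bool) (acc : List String) (head : String)
    (h : head = "--list-profiles" ∨ head = "--show-config") :
    fmaStep cfg (acc, false) head = (acc, false) := by
  rcases h with rfl | rfl <;> simp [fmaStep]

lemma step_app (cfg : Bool) (acc : List String) (head : String)
    (h1 : ¬(head = "--profile" ∨ head = "--init-config" ∨ (head = "--config" ∧ cfg = true)))
    (h2 : ¬(head = "--list-profiles" ∨ head = "--show-config")) :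
    fmaStep cfg (acc, false) head = (acc ++ [head], false) := by
  simp only [not_or] at h1 h2
  obtain ⟨ha, hb, hc⟩ := h1
  obtain ⟨hd, he⟩ := h2
  simp [fmaStep, ha, hb, hc, hd, he]

-- A's foldl equals the structural middle form
lemma fma_foldl_acc (cfg : Bool) (argv : List String) (acc : List String) :
    (argv.foldl (fmaStep cfg) (acc, false)).1 = acc ++ fmaRec argv cfg := by
  fun_induction fmaRec argv cfg generalizing acc with
  | case1 => simp
  | case2 head rest h ih =>
    cases rest with
    | nil => simp [List.foldl_cons, step_skip cfg acc head h, fmaRec]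
    | cons y rs =>
      simpa [List.foldl_cons, step_skip cfg acc head h, step_resume] using ih acc
  | case3 head rest h1 h2 ih =>
    simpa [List.foldl_cons, step_bare cfg acc head h2] using ih acc
  | case4 head rest h1 h2 ih =>
    simpa [List.foldl_cons, step_app cfg acc head h1 h2, List.append_assoc]
      using ih (acc ++ [head])

-- membership tests of the two flag sets, as the disjunctions used by fmaRec
lemma mem_valueFlags (cfg : Bool) (a : String) :
    PySem.Set.contains (fmaValueFlags cfg) a = true ↔
      (a = "--profile" ∨ a = "--init-config" ∨ (a = "--config" ∧ cfg = true)) := by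
  cases cfg <;> simp [fmaValueFlags, PySem.Set.contains_iff, PySem.Set.mem_union,
    PySem.Set.mem_ofList] <;> tauto

lemma mem_bareFlags (a : String) :
    PySem.Set.contains fmaBareFlags a = true ↔
      (a = "--list-profiles" ∨ a = "--show-config") := by
  simp [fmaBareFlags, PySem.Set.contains_iff, PySem.Set.mem_ofList]

-- pass 1 only adds indices ≥ the enumeration start
lemma mark_bound (cfg : Bool) (xs : List String) :
    ∀ (i : Int) (s : PySem.Set Int) (j : Int),
      j ∈ (PySem.List.enumerate xs i).foldl (fmaMarkStep cfg) s → j ∈ s ∨ i ≤ j := by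
  induction xs with
  | nil => intro i s j h; simp [PySem.List.enumerate_nil] at h; exact Or.inl h
  | cons a rest ih =>
    intro i s j h
    rw [PySem.List.enumerate_cons, List.foldl_cons] at h
    rcases ih (i + 1) _ j h with h' | h'
    · unfold fmaMarkStep at h'
      split_ifs at h' with h1 h2 h3
      · exact Or.inl h'
      · rcases (PySem.Set.mem_add _ _ _).1 h' with h'' | h''
        · rcases (PySem.Set.mem_add _ _ _).1 h'' with h'' | h''
          · exact Or.inl h''
          · exact Or.inr (by omega)
        · exact Or.inr (by omega)
      · rcases (PySem.Set.mem_add _ _ _).1 h' with h'' | h''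
        · exact Or.inl h''
        · exact Or.inr (by omega)
      · exact Or.inl h'
    · exact Or.inr (by omega)

-- pass 1 never removes indices
lemma mark_mono (cfg : Bool) (l : List (Int × String)) :
    ∀ (s : PySem.Set Int) (j : Int), j ∈ s → j ∈ l.foldl (fmaMarkStep cfg) s := by
  induction l with
  | nil => intro s j h; simpa using h
  | cons p rest ih =>
    intro s j h
    rw [List.foldl_cons]
    apply ih
    unfold fmaMarkStep
    split_ifs <;> first | exact h | (simp only [PySem.Set.mem_add]; tauto)

-- the two staged passes of B compute the middle form, for any start index and
-- drop-state whose members all lie at or before previous positions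
lemma fma_mark_filter (cfg : Bool) (xs : List String) :
    ∀ (i : Int) (s : PySem.Set Int), (∀ j ∈ s, j ≤ i) → i ∉ s →
      ((PySem.List.enumerate xs i).filter
        (fun p => !(PySem.Set.contains
            ((PySem.List.enumerate xs i).foldl (fmaMarkStep cfg) s) p.1))).map
        (fun p => p.2) = fmaRec xs cfg := by
  fun_induction fmaRec xs cfg with
  | case1 => intro i s _ _; simp [PySem.List.enumerate_nil]
  | case2 head rest h ih =>
    intro i s hs hi
    have hstep : fmaMarkStep cfg s (i, head) =
        PySem.Set.add (PySem.Set.add s i) (i + 1) := by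
      unfold fmaMarkStep
      rw [if_neg (by simpa [PySem.Set.contains_iff] using hi),
        if_pos ((mem_valueFlags cfg head).2 (by simpa using h))]
    cases rest with
    | nil =>
      rw [PySem.List.enumerate_cons, List.foldl_cons, hstep]
      have : i ∈ ((PySem.List.enumerate ([] : List String) (i + 1)).foldl
          (fmaMarkStep cfg) (PySem.Set.add (PySem.Set.add s i) (i + 1))) :=
        mark_mono cfg _ _ i (by simp [PySem.Set.mem_add])
      simp [PySem.List.enumerate_nil, PySem.Set.contains_iff, this, fmaRec]
    | cons b rs =>
      rw [PySem.List.enumerate_cons, List.foldl_cons, hstep,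
        PySem.List.enumerate_cons, List.foldl_cons]
      have hstep2 : fmaMarkStep cfg (PySem.Set.add (PySem.Set.add s i) (i + 1)) (i + 1, b) =
          PySem.Set.add (PySem.Set.add s i) (i + 1) := by
        unfold fmaMarkStep
        rw [if_pos (by simp [PySem.Set.contains_iff, PySem.Set.mem_add])]
      rw [hstep2]
      set s' := PySem.Set.add (PySem.Set.add s i) (i + 1) with hs'
      have hs'le : ∀ j ∈ s', j ≤ i + 1 := by
        intro j hj
        rcases (PySem.Set.mem_add _ _ _).1 hj with hj | hj
        · rcases (PySem.Set.mem_add _ _ _).1 hj with hj | hj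
          · exact le_trans (hs j hj) (by omega)
          · omega
        · omega
      have hD := mark_mono cfg (PySem.List.enumerate rs (i + 1 + 1)) s'
      have hmemi : i ∈ (PySem.List.enumerate rs (i + 1 + 1)).foldl (fmaMarkStep cfg) s' :=
        hD i (by simp [s', PySem.Set.mem_add])
      have hmemi1 : i + 1 ∈ (PySem.List.enumerate rs (i + 1 + 1)).foldl (fmaMarkStep cfg) s' :=
        hD (i + 1) (by simp [s', PySem.Set.mem_add])
      have htail := ih (i + 1 + 1) s' (fun j hj => le_trans (hs'le j hj) (by omega))
        (fun hc => by have := hs'le _ hc; omega)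
      simp only [List.filter_cons, PySem.Set.contains_iff]
      simp [hmemi, hmemi1]
      simpa using htail
  | case3 head rest h1 h2 ih =>
    intro i s hs hi
    have hstep : fmaMarkStep cfg s (i, head) = PySem.Set.add s i := by
      unfold fmaMarkStep
      rw [if_neg (by simpa [PySem.Set.contains_iff] using hi),
        if_neg (by
          intro hc
          exact h1 (by simpa using (mem_valueFlags cfg head).1 hc)),
        if_pos ((mem_bareFlags head).2 h2)]
    rw [PySem.List.enumerate_cons, List.foldl_cons, hstep]
    have hmemi : i ∈ (PySem.List.enumerate rest (i + 1)).foldl (fmaMarkStep cfg)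
        (PySem.Set.add s i) :=
      mark_mono cfg _ _ i (by simp [PySem.Set.mem_add])
    have htail := ih (i + 1) (PySem.Set.add s i)
      (fun j hj => by rcases (PySem.Set.mem_add _ _ _).1 hj with hj | hj
                      · exact le_trans (hs j hj) (by omega)
                      · omega)
      (fun hc => by
        rcases (PySem.Set.mem_add _ _ _).1 hc with hj | hj
        · have := hs _ hj; omega
        · omega)
    simp only [List.filter_cons, PySem.Set.contains_iff]
    simp [hmemi]
    simpa using htail
  | case4 head rest h1 h2 ih =>
    intro i s hs hi
    have hstep : fmaMarkStep cfg s (i, head) = s := by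
      unfold fmaMarkStep
      rw [if_neg (by simpa [PySem.Set.contains_iff] using hi),
        if_neg (by
          intro hc
          exact h1 (by simpa using (mem_valueFlags cfg head).1 hc)),
        if_neg (by
          intro hc
          exact h2 ((mem_bareFlags head).1 hc))]
    rw [PySem.List.enumerate_cons, List.foldl_cons, hstep]
    have hnot : i ∉ (PySem.List.enumerate rest (i + 1)).foldl (fmaMarkStep cfg) s := by
      intro hc
      rcases mark_bound cfg rest (i + 1) s i hc with hj | hj
      · exact hi hj
      · omega
    have htail := ih (i + 1) s (fun j hj => le_trans (hs j hj) (by omega))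
      (fun hc => by have := hs _ hc; omega)
    simp only [List.filter_cons]
    simp [hnot]
    simpa using htail

-- ===== VERDICT (by name: the statement is the Claim_ definition above) =====
theorem filter_meta_args_py_spec : Claim_equal_filter_meta_args_py := by
  intro argv cfg _
  unfold Spec_filter_meta_args_py filter_meta_args_py_alt
  rw [fma_port_eq]
  rw [fma_mark_filter cfg argv 0 PySem.Set.empty (by simp [PySem.Set.empty]) (by simp [PySem.Set.empty])]
  simpa using fma_foldl_acc cfg argv []
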